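-- pv_equiv track=rewrite | github.com/bamonroe/bamcmc | src/bamcmc/reset_utils.py | _get_legacy_special_indices
-- ===== SOURCE A (Python) =====
-- from typing import Any, Dict, List, Optional, Tuple
--
-- def _get_legacy_special_indices(model_type: str, n_subjects: int) -> Dict[str, List[int]]:
--     """Legacy function for backward compatibility with old posteriors."""
--     if model_type == 'mixture_3model_bhm':
--         # Layout per subject: M1(6) + M2(7) + M3(6) + z(1) = 20 params
--         subject_block_size = 20
--         z_offset = 19  # z is last param in subject block
--
--         # r parameter offsets within subject block:
--         # M1: delta(0), r(1), alpha(2), beta(3), mu_risk(4), mu_disc(5)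
--         # M2: delta(6), s(7), r(8), alpha(9), beta(10), mu_risk(11), mu_disc(12)
--         # M3: k(13), r(14), alpha(15), beta(16), mu_risk(17), mu_disc(18)
--         r_offsets = [1, 8, 14]  # r params in M1, M2, M3
--
--         z_indices = [s * subject_block_size + z_offset for s in range(n_subjects)]
--         r_indices = []
--         for s in range(n_subjects):
--             base = s * subject_block_size
--             r_indices.extend([base + off for off in r_offsets])
--
--         # Hyperparameters start after all subjects
--         hyper_start = n_subjects * subject_block_size
--         pi_indices = list(range(hyper_start, hyper_start + 3))
--
--         # Hyperparameter r means (not logsd)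
--         # M1 hypers: 12 values (6 params x 2), r_mean is at index 2
--         # M2 hypers: 14 values (7 params x 2), r_mean is at index 4 (after delta, s)
--         # M3 hypers: 12 values (6 params x 2), r_mean is at index 2
--         m1_hyper_start = hyper_start + 3
--         m2_hyper_start = m1_hyper_start + 12
--         m3_hyper_start = m2_hyper_start + 14
--
--         hyper_r_indices = [
--             m1_hyper_start + 2,   # M1 r mean
--             m2_hyper_start + 4,   # M2 r mean
--             m3_hyper_start + 2,   # M3 r mean
--         ]
--         r_indices.extend(hyper_r_indices)
--
--         return {
--             'z_indices': z_indices,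
--             'pi_indices': pi_indices,
--             'r_indices': r_indices,
--         }
--
--     elif model_type == 'mixture_4model_bhm':
--         # Layout per subject: M1(6) + M2(7) + M3(6) + M4(7) + z(1) = 27 params
--         subject_block_size = 27
--         z_offset = 26
--
--         r_offsets = [1, 8, 14, 21]  # r params in M1, M2, M3, M4
--
--         z_indices = [s * subject_block_size + z_offset for s in range(n_subjects)]
--         r_indices = []
--         for s in range(n_subjects):
--             base = s * subject_block_size
--             r_indices.extend([base + off for off in r_offsets])
--
--         hyper_start = n_subjects * subject_block_size
--         pi_indices = list(range(hyper_start, hyper_start + 4))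
--
--         return {
--             'z_indices': z_indices,
--             'pi_indices': pi_indices,
--             'r_indices': r_indices,
--         }
--
--     elif model_type == 'mixture_2model_bhm':
--         subject_block_size = 14  # M1(6) + M2(7) + z(1)
--         z_offset = 13
--
--         r_offsets = [1, 8]  # r params in M1, M2
--
--         z_indices = [s * subject_block_size + z_offset for s in range(n_subjects)]
--         r_indices = []
--         for s in range(n_subjects):
--             base = s * subject_block_size
--             r_indices.extend([base + off for off in r_offsets])
--
--         hyper_start = n_subjects * subject_block_size
--         pi_indices = list(range(hyper_start, hyper_start + 2))
--
--         return {
--             'z_indices': z_indices,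
--             'pi_indices': pi_indices,
--             'r_indices': r_indices,
--         }
--
--     else:
--         # Non-mixture models: no special handling needed
--         return {
--             'z_indices': [],
--             'pi_indices': [],
--             'r_indices': [],
--         }
-- ===== SOURCE B (Python) =====
-- # Scan-and-classify: instead of constructing indices per subject, walk the flat
-- # subject-parameter index space once and select slots by their residue within the block.
-- _LAYOUTS = {
--     # model_type: (subject_block_size, r residues within a block, n_pi, hyper r offsets from hyper_start)
--     'mixture_2model_bhm': (14, {1, 8}, 2, ()),
--     'mixture_3model_bhm': (20, {1, 8, 14}, 3, (5, 19, 31)),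
--     'mixture_4model_bhm': (27, {1, 8, 14, 21}, 4, ()),
-- }
--
--
-- def _get_legacy_special_indices(model_type, n_subjects):
--     if model_type not in _LAYOUTS:
--         return {'z_indices': [], 'pi_indices': [], 'r_indices': []}
--     block, r_res, n_pi, hyper_r = _LAYOUTS[model_type]
--     hyper_start = n_subjects * block
--     flat = range(max(n_subjects, 0) * block)  # every subject-level parameter slot
--     return {
--         'z_indices': [i for i in flat if i % block == block - 1],
--         'pi_indices': list(range(hyper_start, hyper_start + n_pi)),
--         'r_indices': [i for i in flat if i % block in r_res]
--                      + [hyper_start + h for h in hyper_r],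
--     }
-- ===== Notes on version B (the rewrite author's own statement) =====
-- stated objective: alternative
-- what changed: Instead of constructing indices arithmetically per subject (base = s*block + offset, three duplicated branches), B scans the flat subject-parameter index space once and classifies each slot by its residue modulo the block size, driven by a per-model layout table.
import Mathlib
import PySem

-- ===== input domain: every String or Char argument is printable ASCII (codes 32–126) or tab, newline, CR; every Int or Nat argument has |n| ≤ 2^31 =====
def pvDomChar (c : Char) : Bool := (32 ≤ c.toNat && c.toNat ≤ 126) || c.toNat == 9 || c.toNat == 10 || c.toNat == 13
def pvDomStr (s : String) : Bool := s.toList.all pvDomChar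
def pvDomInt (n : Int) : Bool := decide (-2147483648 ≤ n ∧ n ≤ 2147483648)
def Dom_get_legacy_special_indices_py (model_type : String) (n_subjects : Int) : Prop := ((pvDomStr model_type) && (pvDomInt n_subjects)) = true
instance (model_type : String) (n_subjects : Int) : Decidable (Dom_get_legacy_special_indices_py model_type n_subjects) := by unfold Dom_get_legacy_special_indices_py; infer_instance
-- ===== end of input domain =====

-- B replaces A's per-subject arithmetic construction by a single scan of the flat
-- subject-parameter index space, classifying each slot by its residue modulo the
-- block size (objective: alternative, same O(n) cost up to a constant).

-- ===== PORT A =====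
def get_legacy_special_indices_py (model_type : String) (n_subjects : Int) : List (String × List Int) :=
  if model_type = "mixture_3model_bhm" then
    let subject_block_size : Int := 20
    let z_offset : Int := 19
    let r_offsets : List Int := [1, 8, 14]
    let z_indices := (PySem.List.pyRange 0 n_subjects 1).map (fun s => s * subject_block_size + z_offset)
    let r_indices := (PySem.List.pyRange 0 n_subjects 1).foldl
      (fun acc s => acc ++ r_offsets.map (fun off => s * subject_block_size + off)) []
    let hyper_start := n_subjects * subject_block_size
    let pi_indices := PySem.List.pyRange hyper_start (hyper_start + 3) 1
    let m1_hyper_start := hyper_start + 3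
    let m2_hyper_start := m1_hyper_start + 12
    let m3_hyper_start := m2_hyper_start + 14
    let hyper_r_indices := [m1_hyper_start + 2, m2_hyper_start + 4, m3_hyper_start + 2]
    let r_indices := r_indices ++ hyper_r_indices
    [("z_indices", z_indices), ("pi_indices", pi_indices), ("r_indices", r_indices)]
  else if model_type = "mixture_4model_bhm" then
    let subject_block_size : Int := 27
    let z_offset : Int := 26
    let r_offsets : List Int := [1, 8, 14, 21]
    let z_indices := (PySem.List.pyRange 0 n_subjects 1).map (fun s => s * subject_block_size + z_offset)
    let r_indices := (PySem.List.pyRange 0 n_subjects 1).foldl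
      (fun acc s => acc ++ r_offsets.map (fun off => s * subject_block_size + off)) []
    let hyper_start := n_subjects * subject_block_size
    let pi_indices := PySem.List.pyRange hyper_start (hyper_start + 4) 1
    [("z_indices", z_indices), ("pi_indices", pi_indices), ("r_indices", r_indices)]
  else if model_type = "mixture_2model_bhm" then
    let subject_block_size : Int := 14
    let z_offset : Int := 13
    let r_offsets : List Int := [1, 8]
    let z_indices := (PySem.List.pyRange 0 n_subjects 1).map (fun s => s * subject_block_size + z_offset)
    let r_indices := (PySem.List.pyRange 0 n_subjects 1).foldl
      (fun acc s => acc ++ r_offsets.map (fun off => s * subject_block_size + off)) []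
    let hyper_start := n_subjects * subject_block_size
    let pi_indices := PySem.List.pyRange hyper_start (hyper_start + 2) 1
    [("z_indices", z_indices), ("pi_indices", pi_indices), ("r_indices", r_indices)]
  else
    [("z_indices", []), ("pi_indices", []), ("r_indices", [])]

-- ===== PORT B =====
-- layout table: (subject_block_size, r residues within a block (a set), n_pi, hyper r offsets from hyper_start)
def pvLayouts : PySem.Dict String (Int × PySem.Set Int × Int × List Int) :=
  PySem.Dict.ofList [("mixture_2model_bhm", (14, PySem.Set.ofList [1, 8], 2, [])),
   ("mixture_3model_bhm", (20, PySem.Set.ofList [1, 8, 14], 3, [5, 19, 31])),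
   ("mixture_4model_bhm", (27, PySem.Set.ofList [1, 8, 14, 21], 4, []))]

def get_legacy_special_indices_py_alt (model_type : String) (n_subjects : Int) : List (String × List Int) :=
  match PySem.Dict.get? pvLayouts model_type with
  | none => [("z_indices", []), ("pi_indices", []), ("r_indices", [])]
  | some (block, r_res, n_pi, hyper_r) =>
    let hyper_start := n_subjects * block
    let flat := PySem.List.pyRange 0 (max n_subjects 0 * block) 1
    [("z_indices", flat.filter (fun i => PySem.Int.mod i block == block - 1)),
     ("pi_indices", PySem.List.pyRange hyper_start (hyper_start + n_pi) 1),
     ("r_indices", flat.filter (fun i => r_res.contains (PySem.Int.mod i block))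
        ++ hyper_r.map (fun h => hyper_start + h))]

-- ===== PRECONDITION & SPEC =====
def Spec_get_legacy_special_indices_py (model_type : String) (n_subjects : Int) (out : List (String × List Int)) : Prop := out = get_legacy_special_indices_py_alt model_type n_subjects
instance (model_type : String) (n_subjects : Int) (out : List (String × List Int)) : Decidable (Spec_get_legacy_special_indices_py model_type n_subjects out) := by unfold Spec_get_legacy_special_indices_py; infer_instance

-- ===== CLAIM (what is proved, stated in full; the proofs are below) =====
def Claim_equal_get_legacy_special_indices_py : Prop := ∀ (model_type : String) (n_subjects : Int), Dom_get_legacy_special_indices_py model_type n_subjects → Spec_get_legacy_special_indices_py model_type n_subjects (get_legacy_special_indices_py model_type n_subjects)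

-- ===== LEMMAS AND PROOFS =====
theorem pvLay2 : PySem.Dict.get? pvLayouts "mixture_2model_bhm" = some (14, PySem.Set.ofList [1, 8], 2, []) := by decide
theorem pvLay3 : PySem.Dict.get? pvLayouts "mixture_3model_bhm" = some (20, PySem.Set.ofList [1, 8, 14], 3, [5, 19, 31]) := by decide
theorem pvLay4 : PySem.Dict.get? pvLayouts "mixture_4model_bhm" = some (27, PySem.Set.ofList [1, 8, 14, 21], 4, []) := by decide
theorem pvLayItems : pvLayouts.items = [("mixture_2model_bhm", (14, PySem.Set.ofList [1, 8], 2, [])), ("mixture_3model_bhm", (20, PySem.Set.ofList [1, 8, 14], 3, [5, 19, 31])), ("mixture_4model_bhm", (27, PySem.Set.ofList [1, 8, 14, 21], 4, ([] : List Int)))] := by decide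
theorem pvLayNone (mt : String) (h2 : mt ≠ "mixture_2model_bhm") (h3 : mt ≠ "mixture_3model_bhm") (h4 : mt ≠ "mixture_4model_bhm") : PySem.Dict.get? pvLayouts mt = none := by
  have e2 : (("mixture_2model_bhm" : String) == mt) = false := beq_eq_false_iff_ne.mpr (Ne.symm h2)
  have e3 : (("mixture_3model_bhm" : String) == mt) = false := beq_eq_false_iff_ne.mpr (Ne.symm h3)
  have e4 : (("mixture_4model_bhm" : String) == mt) = false := beq_eq_false_iff_ne.mpr (Ne.symm h4)
  simp [PySem.Dict.get?, pvLayItems, List.find?, e2, e3, e4]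

-- one block of the scan: the slots of subject s whose residue satisfies p
theorem pvChunk (B : Int) (hB : 0 < B) (p : Int → Bool) (s : Int) :
    (PySem.List.pyRange (s * B) (s * B + B) 1).filter (fun i => p (PySem.Int.mod i B))
      = ((List.range B.toNat).filter (fun j : Nat => p (j : Int))).map (fun j : Nat => s * B + (j : Int)) := by
  rw [PySem.List.pyRange_one]
  have hlen : (s * B + B - s * B).toNat = B.toNat := by omega
  rw [hlen, List.filter_map]
  refine congrArg (List.map fun j : Nat => s * B + (j : Int)) ?_
  apply List.filter_congr
  intro j hj
  have hjB : (j : Int) < B := by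
    have := List.mem_range.mp hj; omega
  have hm : PySem.Int.mod (s * B + (j : Int)) B = (j : Int) := by
    rw [PySem.Int.mod_eq_emod_of_pos hB, add_comm, Int.add_mul_emod_self_right]
    exact Int.emod_eq_of_lt (by positivity) hjB
  simp [hm]

-- the full scan over k subject blocks splits into per-subject chunks
theorem pvScan (B : Int) (hB : 0 < B) (p : Int → Bool) (g : Int → List Int)
    (hchunk : ∀ s : Int, (PySem.List.pyRange (s * B) (s * B + B) 1).filter (fun i => p (PySem.Int.mod i B)) = g s) :
    ∀ k : Nat, (PySem.List.pyRange 0 ((k : Int) * B) 1).filter (fun i => p (PySem.Int.mod i B))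
      = (PySem.List.pyRange 0 (k : Int) 1).flatMap g := by
  intro k
  induction k with
  | zero => simp [PySem.List.pyRange_one_eq_nil]
  | succ k ih =>
    have h1 : ((k + 1 : Nat) : Int) * B = (k : Int) * B + B := by push_cast; ring
    have hsplit : PySem.List.pyRange 0 (((k + 1 : Nat) : Int) * B) 1
        = PySem.List.pyRange 0 ((k : Int) * B) 1 ++ PySem.List.pyRange ((k : Int) * B) ((k : Int) * B + B) 1 := by
      rw [h1]
      exact PySem.List.pyRange_one_append 0 ((k : Int) * B) ((k : Int) * B + B) (by positivity) (by omega)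
    have hr : PySem.List.pyRange 0 ((k + 1 : Nat) : Int) 1 = PySem.List.pyRange 0 (k : Int) 1 ++ [(k : Int)] := by
      have := PySem.List.pyRange_one_succ_right (a := 0) (b := (k : Int)) (by positivity)
      push_cast
      push_cast at this
      exact this
    rw [hsplit, List.filter_append, ih, hchunk, hr, List.flatMap_append]
    simp

-- the scan, specialised: for n > 0 subjects, selecting residues 'out' per block
theorem pvScanEq (Bq : Int) (hB : 0 < Bq) (p : Int → Bool) (out : List Int)
    (hout : ((List.range Bq.toNat).filter (fun j : Nat => p (j : Int))).map (fun j : Nat => (j : Int)) = out)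
    (n : Int) (hn : 0 < n) :
    (PySem.List.pyRange 0 (max n 0 * Bq) 1).filter (fun i => p (PySem.Int.mod i Bq))
      = (PySem.List.pyRange 0 n 1).flatMap (fun s => out.map (fun o => s * Bq + o)) := by
  have hmax : max n 0 = n := by omega
  have hk : n = ((n.toNat : Nat) : Int) := by omega
  rw [hmax, hk]
  refine pvScan Bq hB p (fun s => out.map (fun o => s * Bq + o)) ?_ n.toNat
  intro s
  rw [pvChunk Bq hB p s, ← hout]
  simp [List.map_map, Function.comp]

-- the z-scan equals A's per-subject construction
theorem pvZc (Bq : Int) (hB : 0 < Bq) (c : Int)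
    (hc : ((List.range Bq.toNat).filter (fun j : Nat => ((j : Int) == c))).map (fun j : Nat => (j : Int)) = [c])
    (n : Int) (hn : 0 < n) :
    (PySem.List.pyRange 0 (max n 0 * Bq) 1).filter (fun i => PySem.Int.mod i Bq == c)
      = (PySem.List.pyRange 0 n 1).map (fun s => s * Bq + c) := by
  rw [pvScanEq Bq hB (fun r => r == c) [c] hc n hn]
  induction PySem.List.pyRange 0 n 1 with
  | nil => simp
  | cons a l ih =>
    simp only [List.map_cons, List.map_nil] at ih
    simp [List.flatMap_cons, ih]

-- the r-scan equals A's per-subject construction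
theorem pvRc (Bq : Int) (hB : 0 < Bq) (rs : PySem.Set Int) (offs : List Int)
    (h : ((List.range Bq.toNat).filter (fun j : Nat => rs.contains (j : Int))).map (fun j : Nat => (j : Int)) = offs)
    (n : Int) (hn : 0 < n) :
    (PySem.List.pyRange 0 (max n 0 * Bq) 1).filter (fun i => rs.contains (PySem.Int.mod i Bq))
      = (PySem.List.pyRange 0 n 1).flatMap (fun s => offs.map (fun o => s * Bq + o)) :=
  pvScanEq Bq hB (fun r => rs.contains r) offs h n hn

-- ===== VERDICT (by name: the statement is the Claim_ definition above) =====
theorem get_legacy_special_indices_py_spec : Claim_equal_get_legacy_special_indices_py := by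
  intro mt n _
  unfold Spec_get_legacy_special_indices_py
  unfold get_legacy_special_indices_py get_legacy_special_indices_py_alt
  by_cases h3 : mt = "mixture_3model_bhm"
  · subst h3
    by_cases hn : 0 < n
    · have hz := pvZc 20 (by norm_num) (20 - 1) (by decide) n hn
      have hr := pvRc 20 (by norm_num) (PySem.Set.ofList [1, 8, 14]) [1, 8, 14] (by decide) n hn
      simp only [pvLay3]
      rw [hz, hr]
      norm_num [PySem.List.foldl_append_eq_flatMap, List.flatMap_def]
      ring_nf
      simp
    · have hA : PySem.List.pyRange 0 n 1 = [] := PySem.List.pyRange_one_eq_nil (by omega)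
      have h0 : max n 0 = (0 : Int) := by omega
      simp [pvLay3, hA, h0, PySem.List.pyRange_one_eq_nil]
      ring_nf
      simp
  by_cases h4 : mt = "mixture_4model_bhm"
  · subst h4
    by_cases hn : 0 < n
    · have hz := pvZc 27 (by norm_num) (27 - 1) (by decide) n hn
      have hr := pvRc 27 (by norm_num) (PySem.Set.ofList [1, 8, 14, 21]) [1, 8, 14, 21] (by decide) n hn
      simp only [pvLay4]
      rw [hz, hr]
      norm_num [h3, PySem.List.foldl_append_eq_flatMap, List.flatMap_def]
    · have hA : PySem.List.pyRange 0 n 1 = [] := PySem.List.pyRange_one_eq_nil (by omega)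
      have h0 : max n 0 = (0 : Int) := by omega
      simp [h3, pvLay4, hA, h0, PySem.List.pyRange_one_eq_nil]
  by_cases h2 : mt = "mixture_2model_bhm"
  · subst h2
    by_cases hn : 0 < n
    · have hz := pvZc 14 (by norm_num) (14 - 1) (by decide) n hn
      have hr := pvRc 14 (by norm_num) (PySem.Set.ofList [1, 8]) [1, 8] (by decide) n hn
      simp only [pvLay2]
      rw [hz, hr]
      norm_num [h3, h4, PySem.List.foldl_append_eq_flatMap, List.flatMap_def]
    · have hA : PySem.List.pyRange 0 n 1 = [] := PySem.List.pyRange_one_eq_nil (by omega)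
      have h0 : max n 0 = (0 : Int) := by omega
      simp [h3, h4, pvLay2, hA, h0, PySem.List.pyRange_one_eq_nil]
  · simp [h3, h4, h2, pvLayNone mt h2 h3 h4]
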